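-- pv_equiv track=rewrite | github.com/darumilli/DL-8430-HW2 | bleu_eval.py | calculate_clip_count
-- ===== SOURCE A (Python) =====
-- def calculate_clip_count(candidate_dict, reference_dicts):
--     """Count the clip count for each ngram considering all references
--
--     Args:
--         candidate_dict (dict): A dictionary containing the ngrams and their counts in the candidate sentence.
--         reference_dicts (list): A list of dictionaries, where each dictionary contains the ngrams and their counts in a reference sentence.
--
--     Returns:
--         int: The total clip count for all ngrams considering all references.
--     """
--     count = 0
--     for m in candidate_dict.keys():
--         m_w = candidate_dict[m]
--         m_max = 0
--         for ref in reference_dicts: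
--             if m in ref:
--                 m_max = max(m_max, ref[m])
--         m_w = min(m_w, m_max)
--         count += m_w
--     return count
-- ===== SOURCE B (Python) =====
-- def calculate_clip_count(candidate_dict, reference_dicts):
--     """Sum of clipped ngram counts: build one max-count table over all
--     references, then a single pass over the candidate."""
--     max_counts = {}
--     for ref in reference_dicts:
--         for g, cnt in ref.items():
--             max_counts[g] = max(max_counts.get(g, 0), cnt)
--     return sum(min(cnt, max_counts.get(m, 0)) for m, cnt in candidate_dict.items())
-- ===== Notes on version B (the rewrite author's own statement) =====
-- stated objective: faster
-- what changed: Replaces the nested per-candidate-ngram scan over all references by a single pass building a max-count table over the references, followed by one lookup pass over the candidate.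
import Mathlib
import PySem

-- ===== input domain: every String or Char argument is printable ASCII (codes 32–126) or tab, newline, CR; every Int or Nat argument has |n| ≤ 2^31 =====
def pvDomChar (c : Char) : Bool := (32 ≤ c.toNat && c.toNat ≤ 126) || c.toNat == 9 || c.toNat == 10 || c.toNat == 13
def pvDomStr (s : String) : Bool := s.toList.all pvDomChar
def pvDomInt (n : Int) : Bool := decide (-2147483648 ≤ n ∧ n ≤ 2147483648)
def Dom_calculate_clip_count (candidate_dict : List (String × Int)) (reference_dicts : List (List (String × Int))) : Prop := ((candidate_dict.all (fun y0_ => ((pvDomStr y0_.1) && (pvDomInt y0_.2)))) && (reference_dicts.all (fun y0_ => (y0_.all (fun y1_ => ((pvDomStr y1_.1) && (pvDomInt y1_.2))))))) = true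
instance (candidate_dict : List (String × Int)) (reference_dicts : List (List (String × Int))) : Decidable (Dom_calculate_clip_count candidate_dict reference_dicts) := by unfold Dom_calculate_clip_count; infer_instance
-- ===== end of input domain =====

-- B replaces A's per-candidate-ngram scan over every reference by one pass building a
-- max-count table over the references, then one lookup pass over the candidate (faster).


-- ===== PORT A =====
def calculate_clip_count (candidate_dict : List (String × Int)) (reference_dicts : List (List (String × Int))) : Int :=
  -- count = 0; for m in candidate_dict.keys(): ... ; return count
  candidate_dict.foldl (fun count p =>
    let m := p.1
    let m_w := (PySem.Dict.mk candidate_dict).getD m 0   -- candidate_dict[m] (total: m is a key)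
    let m_max := reference_dicts.foldl (fun m_max ref =>
      if (PySem.Dict.mk ref).contains m then
        max m_max ((PySem.Dict.mk ref).getD m 0)          -- ref[m] (total here: m in ref)
      else m_max) 0
    count + min m_w m_max) 0

-- ===== PORT B =====
def calculate_clip_count_alt (candidate_dict : List (String × Int)) (reference_dicts : List (List (String × Int))) : Int :=
  let max_counts := reference_dicts.foldl (fun d ref =>
    ref.foldl (fun d p => d.insert p.1 (max (d.getD p.1 0) p.2)) d) PySem.Dict.empty
  (candidate_dict.map (fun p => min p.2 (max_counts.getD p.1 0))).sum

-- ===== PRECONDITION & SPEC =====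
-- Pre_ requires every association list to have duplicate-free keys: the arguments stand for
-- Python dicts (which cannot hold duplicate keys), so a duplicate-key list corresponds to no
-- Python input and either first-match or clipped reading of it is defensible.
def Pre_calculate_clip_count (candidate_dict : List (String × Int)) (reference_dicts : List (List (String × Int))) : Prop :=
  (candidate_dict.map Prod.fst).Nodup ∧ ∀ ref ∈ reference_dicts, (ref.map Prod.fst).Nodup
instance (candidate_dict : List (String × Int)) (reference_dicts : List (List (String × Int))) : Decidable (Pre_calculate_clip_count candidate_dict reference_dicts) := by unfold Pre_calculate_clip_count; infer_instance

def pvWitness_calculate_clip_count : (List (String × Int)) × (List (List (String × Int))) :=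
  ([("the", 2), ("cat", 1)], [[("the", 1), ("dog", 1)], [("the", 3)]])

def Spec_calculate_clip_count (candidate_dict : List (String × Int)) (reference_dicts : List (List (String × Int))) (out : Int) : Prop := out = calculate_clip_count_alt candidate_dict reference_dicts
instance (candidate_dict : List (String × Int)) (reference_dicts : List (List (String × Int))) (out : Int) : Decidable (Spec_calculate_clip_count candidate_dict reference_dicts out) := by unfold Spec_calculate_clip_count; infer_instance

-- ===== CLAIM (what is proved, stated in full; the proofs are below) =====
def Claim_equal_calculate_clip_count : Prop := ∀ (candidate_dict : List (String × Int)) (reference_dicts : List (List (String × Int))), Dom_calculate_clip_count candidate_dict reference_dicts → Pre_calculate_clip_count candidate_dict reference_dicts → Spec_calculate_clip_count candidate_dict reference_dicts (calculate_clip_count candidate_dict reference_dicts)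

-- ===== LEMMAS AND PROOFS =====

-- Folding one reference (with duplicate-free keys) into the table changes the lookup at m
-- exactly by a max with that reference's first-match value.
theorem getD_foldl_insert_max (ref : List (String × Int)) (m : String)
    (hnd : (ref.map Prod.fst).Nodup) (d : PySem.Dict String Int) :
    (ref.foldl (fun d p => d.insert p.1 (max (d.getD p.1 0) p.2)) d).getD m 0 =
      if (PySem.Dict.mk ref).contains m then
        max (d.getD m 0) ((PySem.Dict.mk ref).getD m 0)
      else d.getD m 0 := by
  induction ref generalizing d with
  | nil => simp [PySem.Dict.contains]
  | cons p rest ih =>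
    obtain ⟨k, v⟩ := p
    simp only [List.map_cons, List.nodup_cons] at hnd
    rw [List.foldl_cons, ih hnd.2]
    rw [PySem.Dict.contains_eq_isSome_get?, PySem.Dict.contains_eq_isSome_get?,
        PySem.Dict.get?_mk_cons]
    by_cases h : m = k
    · subst h
      have hnone : (PySem.Dict.mk rest).get? m = none := by
        rw [PySem.Dict.get?_eq_none_iff_not_mem_keys]
        simpa [PySem.Dict.keys] using hnd.1
      simp [hnone, PySem.Dict.getD_eq_get?_getD, PySem.Dict.get?_mk_cons]
    · simp [PySem.Dict.get?_insert, h, PySem.Dict.getD_eq_get?_getD,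
        PySem.Dict.get?_mk_cons, (by simpa [eq_comm] using h : ¬ k = m)]

-- The finished table's lookup at m is exactly A's inner running-max loop over the references.
theorem getD_table (reference_dicts : List (List (String × Int))) (m : String)
    (hnd : ∀ ref ∈ reference_dicts, (ref.map Prod.fst).Nodup) (d : PySem.Dict String Int) :
    (reference_dicts.foldl (fun d ref =>
        ref.foldl (fun d p => d.insert p.1 (max (d.getD p.1 0) p.2)) d) d).getD m 0 =
      reference_dicts.foldl (fun m_max ref =>
        if (PySem.Dict.mk ref).contains m then
          max m_max ((PySem.Dict.mk ref).getD m 0)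
        else m_max) (d.getD m 0) := by
  induction reference_dicts generalizing d with
  | nil => rfl
  | cons ref rest ih =>
    rw [List.foldl_cons, List.foldl_cons,
      ih (fun r hr => hnd r (List.mem_cons_of_mem _ hr)),
      getD_foldl_insert_max ref m (hnd ref (List.mem_cons_self)) d]

-- ===== VERDICT (by name: the statement is the Claim_ definition above) =====
theorem calculate_clip_count_spec : Claim_equal_calculate_clip_count := by
  intro cand refs _ hpre
  obtain ⟨hc, hr⟩ := hpre
  unfold Spec_calculate_clip_count calculate_clip_count calculate_clip_count_alt
  show cand.foldl (fun count p => count + min ((PySem.Dict.mk cand).getD p.1 0)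
      (refs.foldl (fun m_max ref =>
        if (PySem.Dict.mk ref).contains p.1 then
          max m_max ((PySem.Dict.mk ref).getD p.1 0)
        else m_max) 0)) 0 = _
  rw [PySem.List.foldl_add]
  rw [zero_add]
  show _ = (cand.map (fun p => min p.2 ((refs.foldl (fun d ref =>
      ref.foldl (fun d p => d.insert p.1 (max (d.getD p.1 0) p.2)) d)
      PySem.Dict.empty).getD p.1 0))).sum
  refine congrArg List.sum (List.map_congr_left ?_)
  intro p hp
  rw [getD_table refs p.1 hr PySem.Dict.empty, PySem.Dict.getD_empty]
  have hv : (PySem.Dict.mk cand).getD p.1 0 = p.2 :=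
    PySem.Dict.getD_of_mem_items (d := PySem.Dict.mk cand) (k := p.1) (v := p.2)
      (by simpa using hp) (by simpa [PySem.Dict.keys] using hc) (d0 := 0)
  rw [hv]
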